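-- pv_equiv track=rewrite | github.com/rapoghosyan/RatingSystem | graph.py | GetPlaceBorders
-- ===== SOURCE A (Python) =====
-- def GetPlaceBorders(places): #хотим удобно находить T(K)
--   #places[i] - место которое заняла i-ая команда, массив неубывает
--   #поправила и затестила, вроде все ок
--   borders = []
--   cur = 0
--   m = len(places)
--   for i in range(1, m):
--     if places[i] != places[i - 1]:
--       borders.append([cur, i]) # все команды от cur до i - 1 заняли одно и тоже место
--       cur = i
--   borders.append([cur, m])
--   return borders
-- ===== SOURCE B (Python) =====
-- def GetPlaceBorders(places):
--   # Two-pointer run scan: jump from run start to run end by comparing against the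
--   # run's head element, emitting one pair per run (no per-index neighbor pass).
--   m = len(places)
--   borders = []
--   start = 0
--   while True:
--     end = start + 1
--     while end < m and places[end] == places[start]:
--       end += 1
--     if end >= m:
--       borders.append([start, m])
--       return borders
--     borders.append([start, end])
--     start = end
-- ===== Notes on version B (the rewrite author's own statement) =====
-- stated objective: alternative
-- what changed: B replaces A's per-index neighbor-comparison loop (range(1,m) with a running cur and conditional appends) by a two-pointer run scan: an outer loop over runs whose inner loop advances the end pointer while elements equal the run's HEAD element, emitting one [start,end] pair per run; the closing pair [start,m] is the loop's natural exit.
import Mathlib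
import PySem

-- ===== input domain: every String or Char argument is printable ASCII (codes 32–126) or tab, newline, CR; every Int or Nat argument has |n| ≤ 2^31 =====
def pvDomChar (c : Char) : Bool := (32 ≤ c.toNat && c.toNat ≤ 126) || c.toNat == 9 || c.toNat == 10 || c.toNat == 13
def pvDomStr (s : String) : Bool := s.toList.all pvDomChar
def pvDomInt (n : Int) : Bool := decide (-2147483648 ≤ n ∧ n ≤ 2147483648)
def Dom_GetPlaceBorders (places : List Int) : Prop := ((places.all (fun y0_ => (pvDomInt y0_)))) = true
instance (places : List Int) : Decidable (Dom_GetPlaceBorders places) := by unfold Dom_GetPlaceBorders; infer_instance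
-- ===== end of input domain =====

-- B replaces A's per-index neighbor-comparison loop by a two-pointer run scan (outer loop
-- per run, inner loop comparing against the run's head); same cost ("alternative").

-- ===== PORT A =====
-- A's loop body (borders, cur) -> next state, for index i
def pvStepA (places : List Int) (st : List (List Int) × Int) (i : Int) : List (List Int) × Int :=
  if PySem.List.pyGet? places i ≠ PySem.List.pyGet? places (i - 1)
  then (st.1 ++ [[st.2, i]], i) else st

def GetPlaceBorders (places : List Int) : List (List Int) :=
  let m : Int := places.length
  let s := (PySem.List.pyRange 1 m 1).foldl (pvStepA places) ([], 0)
  s.1 ++ [[s.2, m]]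

-- ===== PORT B =====
-- inner while: advance end while it is in range and places[end] == places[start]
def pvRunEnd (places : List Int) (start : Int) (e : Nat) : Nat :=
  if h : e < places.length ∧
      PySem.List.pyGet? places (e : Int) = PySem.List.pyGet? places start
  then pvRunEnd places start (e + 1) else e
termination_by places.length - e
decreasing_by omega

-- the inner while never moves `end` backwards (used for the outer loop's termination)
theorem pvRunEnd_ge (places : List Int) (start : Int) (e : Nat) :
    e ≤ pvRunEnd places start e := by
  fun_induction pvRunEnd with
  | case1 _ _ ih => omega
  | case2 => omega

-- outer while True: one iteration per run, `borders` is the accumulator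
def pvGoB (places : List Int) (borders : List (List Int)) (start : Nat) : List (List Int) :=
  let e := pvRunEnd places (start : Int) (start + 1)
  if places.length ≤ e then borders ++ [[(start : Int), (places.length : Int)]]
  else pvGoB places (borders ++ [[(start : Int), (e : Int)]]) e
termination_by places.length - start
decreasing_by
  have := pvRunEnd_ge places (start : Int) (start + 1)
  omega

def GetPlaceBorders_alt (places : List Int) : List (List Int) :=
  pvGoB places [] 0

-- ===== PRECONDITION & SPEC =====
def Spec_GetPlaceBorders (places : List Int) (out : List (List Int)) : Prop := out = GetPlaceBorders_alt places
instance (places : List Int) (out : List (List Int)) : Decidable (Spec_GetPlaceBorders places out) := by unfold Spec_GetPlaceBorders; infer_instance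

-- ===== CLAIM (what is proved, stated in full; the proofs are below) =====
def Claim_equal_GetPlaceBorders : Prop := ∀ (places : List Int), Dom_GetPlaceBorders places → Spec_GetPlaceBorders places (GetPlaceBorders places)

-- ===== LEMMAS AND PROOFS =====

theorem pvRunEnd_le (places : List Int) (start : Int) (e : Nat) (he : e ≤ places.length) :
    pvRunEnd places start e ≤ places.length := by
  fun_induction pvRunEnd with
  | case1 e h ih => exact ih (by omega)
  | case2 => omega

-- every index strictly inside the scanned run holds the run's head value
theorem pvRunEnd_mem (places : List Int) (start : Int) (e : Nat) :
    ∀ i : Nat, e ≤ i → i < pvRunEnd places start e →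
      PySem.List.pyGet? places (i : Int) = PySem.List.pyGet? places start := by
  fun_induction pvRunEnd with
  | case1 e h ih =>
    intro i h1 h2
    rcases Nat.eq_or_lt_of_le h1 with h1 | h1
    · subst h1; exact h.2
    · exact ih i h1 h2
  | case2 e h => intro i h1 h2; omega

-- the scan stops, when still in range, at a value different from the head
theorem pvRunEnd_stop (places : List Int) (start : Int) (e : Nat)
    (h : pvRunEnd places start e < places.length) :
    PySem.List.pyGet? places ((pvRunEnd places start e : Nat) : Int) ≠
      PySem.List.pyGet? places start := by
  fun_induction pvRunEnd with
  | case1 _ _ ih => exact ih h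
  | case2 e hc => intro hEq; exact hc ⟨h, hEq⟩

-- A's fold does nothing on a block of indices where no adjacent pair differs
theorem pvFoldA_id (places : List Int) (L : List Int)
    (h : ∀ i ∈ L, PySem.List.pyGet? places i = PySem.List.pyGet? places (i - 1))
    (st : List (List Int) × Int) :
    L.foldl (pvStepA places) st = st := by
  induction L generalizing st with
  | nil => rfl
  | cons a t ih =>
    have ha := h a (by simp)
    simp only [List.foldl_cons, pvStepA, ha, ne_eq, not_true_eq_false, ite_false]
    exact ih (fun i hi => h i (by simp [hi])) st

-- every index strictly inside the run starting at `start` agrees with its left neighbour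
theorem pvRunBlock (places : List Int) (start : Nat) :
    ∀ i ∈ PySem.List.pyRange ((start : Int) + 1)
        ((pvRunEnd places (start : Int) (start + 1) : Nat) : Int) 1,
      PySem.List.pyGet? places i = PySem.List.pyGet? places (i - 1) := by
  intro i hi
  rw [PySem.List.mem_pyRange_one] at hi
  set E := pvRunEnd places (start : Int) (start + 1) with hE
  have h0 : 0 ≤ i := by omega
  have hji : ((i.toNat : Nat) : Int) = i := Int.toNat_of_nonneg h0
  have hj1 : start + 1 ≤ i.toNat := by omega
  have hj2 : i.toNat < E := by omega
  have hhead := pvRunEnd_mem places (start : Int) (start + 1) i.toNat hj1 hj2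
  rw [hji] at hhead
  by_cases hfst : i.toNat = start + 1
  · have : i - 1 = (start : Int) := by omega
    rw [hhead, this]
  · have hl1 : start + 1 ≤ i.toNat - 1 := by omega
    have hl2 : i.toNat - 1 < E := by omega
    have hprev := pvRunEnd_mem places (start : Int) (start + 1) (i.toNat - 1) hl1 hl2
    have : ((i.toNat - 1 : Nat) : Int) = i - 1 := by omega
    rw [this] at hprev
    rw [hhead, hprev]

-- MAIN INVARIANT: A's loop restarted at `start` with accumulator b0 computes pvGoB
theorem pvMain (places : List Int) (n : Nat) :
    ∀ (start : Nat) (b0 : List (List Int)),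
      places.length - start ≤ n → (start : Int) ≤ places.length →
      (let s := (PySem.List.pyRange ((start : Int) + 1) (places.length : Int) 1).foldl
          (pvStepA places) (b0, (start : Int));
       s.1 ++ [[s.2, (places.length : Int)]]) = pvGoB places b0 start := by
  induction n with
  | zero =>
    intro start b0 hn hle
    have hsl : start = places.length := by omega
    rw [pvGoB]
    have hEbig : places.length ≤ pvRunEnd places (start : Int) (start + 1) := by
      have := pvRunEnd_ge places (start : Int) (start + 1); omega
    rw [if_pos hEbig, PySem.List.pyRange_one_eq_nil (by omega)]
    simp
  | succ n ih =>
    intro start b0 hn hle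
    rw [pvGoB]
    set E := pvRunEnd places (start : Int) (start + 1) with hEdef
    have hge : start + 1 ≤ E := pvRunEnd_ge places (start : Int) (start + 1)
    by_cases hcase : places.length ≤ E
    · rw [if_pos hcase]
      by_cases hsm : start + 1 ≤ places.length
      · have hElen : E = places.length := by
          have := pvRunEnd_le places (start : Int) (start + 1) hsm; omega
        have hblock : ∀ i ∈ PySem.List.pyRange ((start : Int) + 1) (places.length : Int) 1,
            PySem.List.pyGet? places i = PySem.List.pyGet? places (i - 1) := by
          intro i hi
          exact pvRunBlock places start i (by rw [← hEdef, hElen]; exact_mod_cast hi)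
        rw [pvFoldA_id places _ hblock]
      · rw [PySem.List.pyRange_one_eq_nil (by omega)]
        simp
    · rw [if_neg hcase]
      rw [not_le] at hcase
      have hsm : ((start : Int) + 1) ≤ (E : Int) := by exact_mod_cast hge
      have hEl : (E : Int) ≤ (places.length : Int) := by exact_mod_cast (le_of_lt hcase)
      rw [PySem.List.pyRange_one_append ((start : Int) + 1) (E : Int) (places.length : Int)
        hsm hEl]
      rw [PySem.List.pyRange_one_cons (a := (E : Int)) (b := (places.length : Int)) (by exact_mod_cast hcase)]
      rw [List.foldl_append]
      rw [pvFoldA_id places (PySem.List.pyRange ((start : Int) + 1) (E : Int) 1)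
        (fun i hi => pvRunBlock places start i (by rw [← hEdef]; exact hi)) (b0, (start : Int))]
      rw [List.foldl_cons]
      have hstep : pvStepA places (b0, (start : Int)) (E : Int)
          = (b0 ++ [[(start : Int), (E : Int)]], (E : Int)) := by
        have hstop := pvRunEnd_stop places (start : Int) (start + 1) (by omega)
        rw [← hEdef] at hstop
        have hprev : PySem.List.pyGet? places ((E : Int) - 1)
            = PySem.List.pyGet? places (start : Int) := by
          by_cases hfst : E = start + 1
          · have : (E : Int) - 1 = (start : Int) := by omega
            rw [this]
          · have h1 : start + 1 ≤ E - 1 := by omega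
            have h2 : E - 1 < E := by omega
            have := pvRunEnd_mem places (start : Int) (start + 1) (E - 1) h1 h2
            have hc : ((E - 1 : Nat) : Int) = (E : Int) - 1 := by omega
            rw [hc] at this
            exact this
        unfold pvStepA
        rw [if_pos]
        rw [hprev]
        exact hstop
      rw [hstep]
      have hIH := ih E (b0 ++ [[(start : Int), (E : Int)]]) (by omega) hEl
      rw [← hIH]

-- ===== VERDICT (by name: the statement is the Claim_ definition above) =====
theorem GetPlaceBorders_spec : Claim_equal_GetPlaceBorders := by
  intro places _
  unfold Spec_GetPlaceBorders GetPlaceBorders GetPlaceBorders_alt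
  have := pvMain places places.length 0 [] (by omega) (Int.natCast_nonneg places.length)
  simpa using this
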